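-- pv_equiv track=rewrite | github.com/danish45007/Code-Algo-DS | Stack/7.py | two_to_1D
-- ===== SOURCE A (Python) =====
-- def two_to_1D(arr):
--     d = []
--     for j in range(len(arr)):
--         d.append(arr[0][j])
--
--     for i in range(1,len(arr)):
--         for j in range(len(arr)):
--             if arr[i][j] == 0:
--                 d[j]= 0
--             else:
--                 d[j] = d[j] + arr[i][j]
--
--     return d
-- ===== SOURCE B (Python) =====
-- def two_to_1D(arr):
--     # The forward reset-accumulate is equivalent to: sum the column suffix after
--     # the LAST zero among rows 1..n-1 (row 0 included only if no such zero exists).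
--     # So scan each column bottom-up, summing until a zero is hit (early exit).
--     n = len(arr)
--     res = []
--     for j in range(n):
--         col = 0
--         for i in range(n - 1, 0, -1):
--             if arr[i][j] == 0:
--                 break
--             col += arr[i][j]
--         else:
--             col += arr[0][j]
--         res.append(col)
--     return res
-- ===== Notes on version B (the rewrite author's own statement) =====
-- stated objective: alternative
-- what changed: B replaces A's forward accumulate-with-reset (copy row 0, then add or reset per row) by a different algorithm: per column it scans rows bottom-up summing the suffix until it hits a zero (early exit), adding row 0 only when no zero was seen, which is correct because the final value is exactly the column-suffix sum after the last reset.
import Mathlib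
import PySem

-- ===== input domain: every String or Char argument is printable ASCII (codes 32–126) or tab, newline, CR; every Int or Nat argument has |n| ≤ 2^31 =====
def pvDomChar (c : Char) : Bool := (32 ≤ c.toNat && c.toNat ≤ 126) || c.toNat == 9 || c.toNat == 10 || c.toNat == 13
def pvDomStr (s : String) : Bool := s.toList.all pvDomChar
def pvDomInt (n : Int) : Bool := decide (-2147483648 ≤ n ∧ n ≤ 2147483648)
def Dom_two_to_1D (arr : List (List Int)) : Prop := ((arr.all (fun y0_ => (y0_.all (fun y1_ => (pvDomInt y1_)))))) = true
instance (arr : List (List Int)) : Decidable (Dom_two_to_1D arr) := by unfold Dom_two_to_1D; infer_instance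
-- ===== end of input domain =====

-- B computes each column bottom-up, summing the suffix until the last reset (zero) is hit
-- (row 0 added only if no zero was seen), instead of A's forward accumulate-with-reset;
-- objective: alternative algorithm of the same cost.


-- shared element access arr[i][j] (indices are in range on Pre_, where Python does not raise)
def pvAt (arr : List (List Int)) (i j : Nat) : Int := (arr.getD i []).getD j 0

-- ===== PORT A =====
-- first loop: d.append(arr[0][j]) for j in range(len(arr)); then nested in-place update of d
def two_to_1D (arr : List (List Int)) : List Int :=
  let n := arr.length
  let d0 := (List.range n).map (fun j => pvAt arr 0 j)
  (List.range' 1 (n - 1)).foldl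
    (fun d i =>
      (List.range n).foldl
        (fun d j =>
          if pvAt arr i j = 0 then d.set j 0
          else d.set j (d.getD j 0 + pvAt arr i j)) d) d0

-- ===== PORT B =====
-- the inner 'for i in range(n-1, 0, -1): if arr[i][j]==0: break; col += arr[i][j]
--  else: col += arr[0][j]' loop, over the descending row list, with accumulator col
def colGo (arr : List (List Int)) (j : Nat) (acc : Int) : List Nat → Int
  | [] => acc + pvAt arr 0 j                                   -- for-else: no break seen
  | i :: rest => if pvAt arr i j = 0 then acc                  -- break
                 else colGo arr j (acc + pvAt arr i j) rest

-- per column j: bottom-up scan; range(n-1, 0, -1) is the reverse of range(1, n)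
def two_to_1D_alt (arr : List (List Int)) : List Int :=
  let n := arr.length
  (List.range n).map (fun j => colGo arr j 0 ((List.range' 1 (n - 1)).reverse))

-- ===== PRECONDITION & SPEC =====
-- Pre_ excludes exactly the inputs where Python A raises IndexError: some row shorter than len(arr).
def Pre_two_to_1D (arr : List (List Int)) : Prop :=
  ∀ row ∈ arr, arr.length ≤ row.length
instance (arr : List (List Int)) : Decidable (Pre_two_to_1D arr) := by unfold Pre_two_to_1D; infer_instance
def pvWitness_two_to_1D : List (List Int) := [[1, 0], [2, 3]]

def Spec_two_to_1D (arr : List (List Int)) (out : List Int) : Prop := out = two_to_1D_alt arr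
instance (arr : List (List Int)) (out : List Int) : Decidable (Spec_two_to_1D arr out) := by unfold Spec_two_to_1D; infer_instance

-- ===== CLAIM (what is proved, stated in full; the proofs are below) =====
def Claim_equal_two_to_1D : Prop := ∀ (arr : List (List Int)), Dom_two_to_1D arr → Pre_two_to_1D arr → Spec_two_to_1D arr (two_to_1D arr)

-- ===== LEMMAS AND PROOFS =====

-- A's inner loop rewrites index j once each, using the old value at j: on a prefix range it
-- replaces the first k entries and leaves the rest untouched.
theorem foldl_set_range (g : Nat → Int → Int) :
    ∀ (k : Nat) (d : List Int), k ≤ d.length →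
      (List.range k).foldl (fun acc j => acc.set j (g j (acc.getD j 0))) d
        = ((List.range k).map (fun j => g j (d.getD j 0))) ++ d.drop k := by
  intro k
  induction k with
  | zero => simp
  | succ k ih =>
    intro d hk
    have hk' : k ≤ d.length := Nat.le_of_succ_le hk
    have hklt : k < d.length := hk
    rw [List.range_succ, List.foldl_append, ih d hk']
    have hlen : ((List.range k).map (fun j => g j (d.getD j 0))).length = k := by simp
    have hgetD :
        (((List.range k).map (fun j => g j (d.getD j 0))) ++ d.drop k).getD k 0 = d.getD k 0 := by
      rw [List.getD, List.getD, List.getElem?_append_right (by omega),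
        hlen, Nat.sub_self, List.getElem?_drop]
      simp
    have hdrop : d.drop k = d[k] :: d.drop (k + 1) := List.drop_eq_getElem_cons hklt
    simp only [List.foldl_cons, List.foldl_nil, hgetD]
    rw [List.set_append_right _ _ (by omega), hlen, Nat.sub_self, hdrop, List.set_cons_zero]
    simp [List.getD, List.getElem?_eq_getElem hklt]

-- value form, for lists of exactly the right length
theorem inner_loop_eq (g : Nat → Int → Int) (d : List Int) :
    (List.range d.length).foldl (fun acc j => acc.set j (g j (acc.getD j 0))) d
      = (List.range d.length).map (fun j => g j (d.getD j 0)) := by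
  have := foldl_set_range g d.length d le_rfl
  simpa using this

theorem getD_map_range (f : Nat → Int) {j n : Nat} (hj : j < n) :
    ((List.range n).map f).getD j 0 = f j := by
  simp [List.getD, hj]

-- the outer row loop commutes with the per-column decomposition
theorem outer_loop_eq (g : Nat → Nat → Int → Int) (n : Nat) :
    ∀ (rows : List Nat) (d : List Int), d.length = n →
      rows.foldl (fun d i =>
          (List.range n).foldl (fun acc j => acc.set j (g i j (acc.getD j 0))) d) d
        = (List.range n).map (fun j => rows.foldl (fun c i => g i j c) (d.getD j 0)) := by
  intro rows
  induction rows with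
  | nil =>
    intro d hd
    subst hd
    apply List.ext_getElem (by simp)
    intro j h1 h2
    have hj : j < d.length := by simpa using h2
    simp [List.getD, List.getElem?_eq_getElem hj]
  | cons i rest ih =>
    intro d hd
    have hstep :
        (List.range n).foldl (fun acc j => acc.set j (g i j (acc.getD j 0))) d
          = (List.range n).map (fun j => g i j (d.getD j 0)) := by
      rw [← hd]; exact inner_loop_eq (g i) d
    simp only [List.foldl_cons, hstep]
    rw [ih _ (by simp)]
    refine List.map_congr_left ?_
    intro j hj
    rw [getD_map_range _ (List.mem_range.mp hj)]

-- proof-side generalisation of colGo with an arbitrary base value in place of arr[0][j]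
def goB (arr : List (List Int)) (j : Nat) (base acc : Int) : List Nat → Int
  | [] => acc + base
  | i :: rest => if pvAt arr i j = 0 then acc else goB arr j base (acc + pvAt arr i j) rest

theorem colGo_eq_goB (arr : List (List Int)) (j : Nat) :
    ∀ (m : List Nat) (acc : Int), colGo arr j acc m = goB arr j (pvAt arr 0 j) acc m := by
  intro m
  induction m with
  | nil => intro acc; rfl
  | cons i rest ih =>
    intro acc
    simp only [colGo, goB]
    split <;> simp [ih]

theorem goB_acc (arr : List (List Int)) (j : Nat) (b : Int) :
    ∀ (m : List Nat) (acc : Int), goB arr j b acc m = acc + goB arr j b 0 m := by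
  intro m
  induction m with
  | nil => intro acc; simp [goB]
  | cons i rest ih =>
    intro acc
    simp only [goB]
    split
    · simp
    · rw [ih, ih (0 + pvAt arr i j)]; ring

theorem goB_snoc (arr : List (List Int)) (j : Nat) :
    ∀ (m : List Nat) (b : Int) (i : Nat),
      goB arr j b 0 (m ++ [i])
        = goB arr j (if pvAt arr i j = 0 then 0 else b + pvAt arr i j) 0 m := by
  intro m
  induction m with
  | nil =>
    intro b i
    simp only [List.nil_append, goB]
    split <;> simp [Int.add_comm]
  | cons k rest ih =>
    intro b i
    simp only [List.cons_append, goB]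
    split
    · rfl
    · rw [goB_acc, ih, ← goB_acc]

-- the forward reset-accumulate fold equals the bottom-up break scan over the reversed rows
theorem foldl_eq_goB (arr : List (List Int)) (j : Nat) :
    ∀ (l : List Nat) (b : Int),
      l.foldl (fun c i => if pvAt arr i j = 0 then 0 else c + pvAt arr i j) b
        = goB arr j b 0 l.reverse := by
  intro l
  induction l with
  | nil => intro b; simp [goB]
  | cons i rest ih =>
    intro b
    simp only [List.foldl_cons, List.reverse_cons]
    rw [ih, goB_snoc]

-- ===== VERDICT (by name: the statement is the Claim_ definition above) =====
theorem two_to_1D_spec : Claim_equal_two_to_1D := by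
  intro arr _ _
  unfold Spec_two_to_1D two_to_1D two_to_1D_alt
  have h := outer_loop_eq
      (fun i j c => if pvAt arr i j = 0 then 0 else c + pvAt arr i j)
      arr.length (List.range' 1 (arr.length - 1))
      ((List.range arr.length).map (fun j => pvAt arr 0 j)) (by simp)
  simp only [] at h ⊢
  rw [show (fun (d : List Int) (i : Nat) =>
        (List.range arr.length).foldl
          (fun d j => if pvAt arr i j = 0 then d.set j 0
            else d.set j (d.getD j 0 + pvAt arr i j)) d)
      = (fun (d : List Int) (i : Nat) =>
        (List.range arr.length).foldl
          (fun acc j => acc.set j (if pvAt arr i j = 0 then 0 else acc.getD j 0 + pvAt arr i j)) d)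
    from by funext d i; congr 1; funext acc j; split <;> rfl]
  rw [h]
  refine List.map_congr_left ?_
  intro j hj
  rw [getD_map_range _ (List.mem_range.mp hj), foldl_eq_goB, ← colGo_eq_goB]
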